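-- pv_equiv track=rewrite | github.com/shan18/Topic-Based-Image-Captioning | dataset/process_dataset.py | create_multi_label_categories_vector
-- ===== SOURCE A (Python) =====
-- def create_multi_label_categories_vector(categories_list, category_id):
--     categories_encoded = []
--     for categories in categories_list:
--         encode = [0] * len(category_id)
--         for category in categories:
--             encode[category_id[category]] = 1
--         categories_encoded.append(encode)
--     return categories_encoded
-- ===== SOURCE B (Python) =====
-- def _encode_row(categories, category_id, k):
--     present = {category_id[c] for c in categories}
--     return [1 if i in present else 0 for i in range(k)]
--
--
-- def create_multi_label_categories_vector(categories_list, category_id):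
--     k = len(category_id)
--     return [_encode_row(categories, category_id, k) for categories in categories_list]
-- ===== Notes on version B (the rewrite author's own statement) =====
-- stated objective: alternative
-- what changed: B replaces A's scatter (preallocate a zero row, then write 1 at each looked-up index) by first collecting the set of active column ids per row and then generating the row as a membership scan over all column positions.
-- intended difference: On rows containing a category mapped to a negative id (with no other category in the row mapped to id+len(category_id)), A's negative-index wraparound marks a column counted from the end while B leaves the row unmarked there; B's value is intended because ids are meant to be column indices and a negative id should not silently mark a column. — e.g. on create_multi_label_categories_vector([["a"]], [("a", -1), ("b", 0)]): A returns [[0, 1]], B returns [[0, 0]]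
import Mathlib
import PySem

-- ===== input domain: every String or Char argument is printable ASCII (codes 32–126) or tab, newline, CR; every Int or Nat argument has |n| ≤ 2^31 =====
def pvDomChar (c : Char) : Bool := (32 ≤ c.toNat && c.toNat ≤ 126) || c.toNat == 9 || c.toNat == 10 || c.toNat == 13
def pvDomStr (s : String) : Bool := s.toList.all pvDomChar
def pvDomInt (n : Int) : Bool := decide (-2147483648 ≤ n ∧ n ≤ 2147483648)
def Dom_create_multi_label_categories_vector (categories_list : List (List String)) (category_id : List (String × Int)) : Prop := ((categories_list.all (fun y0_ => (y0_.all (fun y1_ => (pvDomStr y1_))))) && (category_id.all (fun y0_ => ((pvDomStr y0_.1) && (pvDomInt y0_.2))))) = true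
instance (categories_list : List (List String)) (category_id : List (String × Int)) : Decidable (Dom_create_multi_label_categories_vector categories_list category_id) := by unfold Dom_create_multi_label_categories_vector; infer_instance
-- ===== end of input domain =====

-- B builds each row by collecting the set of active column ids and scanning all positions
-- (membership test), instead of A's scatter of 1s into a preallocated zero row; same cost, different decomposition.


-- dict lookup, shared by both ports (category_id is a Python dict)
def pvLook (category_id : List (String × Int)) (c : String) : Option Int :=
  (PySem.Dict.mk category_id).get? c

-- ===== PORT A =====
-- encode = [0]*len(category_id); for category in categories: encode[category_id[category]] = 1
def pvRowA (category_id : List (String × Int)) (categories : List String) : List Int :=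
  categories.foldl
    (fun encode category =>
      match pvLook category_id category with
      | some v => PySem.List.pySetD encode v 1   -- Pre_ excludes the raising cases (missing key, index out of range)
      | none => encode)
    (List.replicate category_id.length 0)

def create_multi_label_categories_vector (categories_list : List (List String)) (category_id : List (String × Int)) : List (List Int) :=
  categories_list.foldl (fun acc categories => acc ++ [pvRowA category_id categories]) []

-- ===== PORT B =====
-- present = {category_id[c] for c in categories}; [1 if i in present else 0 for i in range(k)]
def pvRowB (category_id : List (String × Int)) (categories : List String) : List Int :=
  let present : PySem.Set Int :=
    PySem.Set.ofList (categories.map (fun c => (pvLook category_id c).getD 0))  -- Pre_ excludes the missing-key (KeyError) case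
  (PySem.List.pyRange 0 (category_id.length : Int) 1).map
    (fun i => if present.contains i then (1 : Int) else 0)

def create_multi_label_categories_vector_alt (categories_list : List (List String)) (category_id : List (String × Int)) : List (List Int) :=
  categories_list.map (fun categories => pvRowB category_id categories)

-- ===== PRECONDITION & SPEC =====
-- Pre_ excludes exactly the inputs where Python A raises: a category missing from the dict (KeyError)
-- or a looked-up id outside [-K, K) with K = len(category_id) (IndexError on the row assignment).
def Pre_create_multi_label_categories_vector (categories_list : List (List String)) (category_id : List (String × Int)) : Prop :=
  (categories_list.all (fun categories => categories.all (fun c =>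
    match pvLook category_id c with
    | some v => decide (-(category_id.length : Int) ≤ v ∧ v < (category_id.length : Int))
    | none => false))) = true

instance (categories_list : List (List String)) (category_id : List (String × Int)) : Decidable (Pre_create_multi_label_categories_vector categories_list category_id) := by
  unfold Pre_create_multi_label_categories_vector; infer_instance

def pvWitness_create_multi_label_categories_vector : List (List String) × (List (String × Int)) :=
  ([["a"], []], [("a", 0), ("b", 1)])

-- On rows containing a category mapped to a negative id (with no other category in the row mapped to
-- id+K, K = len(category_id)), A's negative-index wraparound marks a column counted from the end while B
-- leaves the row unmarked there; B's value is intended because ids are meant to be column indices.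
def D_create_multi_label_categories_vector (categories_list : List (List String)) (category_id : List (String × Int)) : Prop :=
  (categories_list.any (fun categories => categories.any (fun c =>
    match pvLook category_id c with
    | some v => decide (v < 0) &&
        !(categories.any (fun c' => pvLook category_id c' == some (v + (category_id.length : Int))))
    | none => false))) = true

instance (categories_list : List (List String)) (category_id : List (String × Int)) : Decidable (D_create_multi_label_categories_vector categories_list category_id) := by
  unfold D_create_multi_label_categories_vector; infer_instance

def Spec_create_multi_label_categories_vector (categories_list : List (List String)) (category_id : List (String × Int)) (out : List (List Int)) : Prop :=
  ¬ D_create_multi_label_categories_vector categories_list category_id → out = create_multi_label_categories_vector_alt categories_list category_id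
instance (categories_list : List (List String)) (category_id : List (String × Int)) (out : List (List Int)) : Decidable (Spec_create_multi_label_categories_vector categories_list category_id out) := by
  unfold Spec_create_multi_label_categories_vector; infer_instance

def pvDiffWitness_create_multi_label_categories_vector : List (List String) × (List (String × Int)) :=
  ([["a"]], [("a", -1), ("b", 0)])

def pvDiffWitnessOut_create_multi_label_categories_vector : (List (List Int)) × (List (List Int)) :=
  ([[0, 1]], [[0, 0]])

-- ===== CLAIM (what is proved, stated in full; the proofs are below) =====
def Claim_unchanged_create_multi_label_categories_vector : Prop := ∀ (categories_list : List (List String)) (category_id : List (String × Int)), Dom_create_multi_label_categories_vector categories_list category_id → Pre_create_multi_label_categories_vector categories_list category_id → Spec_create_multi_label_categories_vector categories_list category_id (create_multi_label_categories_vector categories_list category_id)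
def Claim_changed_create_multi_label_categories_vector : Prop := Dom_create_multi_label_categories_vector (pvDiffWitness_create_multi_label_categories_vector.1) (pvDiffWitness_create_multi_label_categories_vector.2) ∧ Pre_create_multi_label_categories_vector (pvDiffWitness_create_multi_label_categories_vector.1) (pvDiffWitness_create_multi_label_categories_vector.2) ∧ D_create_multi_label_categories_vector (pvDiffWitness_create_multi_label_categories_vector.1) (pvDiffWitness_create_multi_label_categories_vector.2) ∧ create_multi_label_categories_vector (pvDiffWitness_create_multi_label_categories_vector.1) (pvDiffWitness_create_multi_label_categories_vector.2) = pvDiffWitnessOut_create_multi_label_categories_vector.1 ∧ create_multi_label_categories_vector_alt (pvDiffWitness_create_multi_label_categories_vector.1) (pvDiffWitness_create_multi_label_categories_vector.2) = pvDiffWitnessOut_create_multi_label_categories_vector.2 ∧ pvDiffWitnessOut_create_multi_label_categories_vector.1 ≠ pvDiffWitnessOut_create_multi_label_categories_vector.2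
def Claim_exact_create_multi_label_categories_vector : Prop := ∀ (categories_list : List (List String)) (category_id : List (String × Int)), Dom_create_multi_label_categories_vector categories_list category_id → Pre_create_multi_label_categories_vector categories_list category_id → D_create_multi_label_categories_vector categories_list category_id → create_multi_label_categories_vector categories_list category_id ≠ create_multi_label_categories_vector_alt categories_list category_id
-- ===== LEMMAS AND PROOFS =====

-- the column Python's row assignment encode[v] = 1 actually writes (negative v counts from the end)
def pvNorm (K : Nat) (v : Int) : Nat := if v < 0 then (v + K).toNat else v.toNat

theorem pvSetD_norm (xs : List Int) (v : Int) (h1 : -(xs.length : Int) ≤ v) (h2 : v < (xs.length : Int)) :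
    PySem.List.pySetD xs v 1 = xs.set (pvNorm xs.length v) 1 := by
  by_cases hv : v < 0
  · simp only [PySem.List.pySetD, PySem.List.pySet?, PySem.List.pyIdx?,
      if_neg (by omega : ¬ (0:Int) ≤ v), if_pos h1, Option.map_some, Option.getD_some, pvNorm, if_pos hv]
    congr 1
    omega
  · rw [PySem.List.pySetD_of_nonneg xs 1 (by omega)]
    simp [pvNorm, hv]

theorem getD_setFold (vals : List Int) (e : List Int) (j : Nat) (hj : j < e.length)
    (hv : ∀ v ∈ vals, -(e.length : Int) ≤ v ∧ v < (e.length : Int)) :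
    (vals.foldl (fun e v => PySem.List.pySetD e v 1) e).getD j 0 =
      if vals.any (fun v => pvNorm e.length v == j) then 1 else e.getD j 0 := by
  induction vals generalizing e with
  | nil => simp
  | cons v vs ih =>
    have hvm := hv v (by simp)
    have hset : PySem.List.pySetD e v 1 = e.set (pvNorm e.length v) 1 :=
      pvSetD_norm e v hvm.1 hvm.2
    have hlen : (e.set (pvNorm e.length v) 1).length = e.length := by simp
    have ihx := ih (e.set (pvNorm e.length v) 1) (by omega)
      (by intro w hw; rw [hlen]; exact hv w (by simp [hw]))
    simp only [List.foldl_cons, hset, ihx, hlen, List.any_cons]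
    by_cases hrest : vs.any (fun v => pvNorm e.length v == j) = true
    · simp [hrest]
    · simp only [hrest, Bool.or_false]
      by_cases hhit : pvNorm e.length v = j
      · simp [hhit, hj]
      · have : (pvNorm e.length v == j) = false := by simp [hhit]
        simp only [this]
        rw [List.getD_eq_getElem _ _ (by omega : j < (e.set (pvNorm e.length v) 1).length),
            List.getD_eq_getElem _ _ hj]
        simp [hhit]

theorem pvRowA_eq_valsFold (cid : List (String × Int)) (cats : List String)
    (h : ∀ c ∈ cats, (pvLook cid c).isSome) :
    pvRowA cid cats =
      (cats.map (fun c => (pvLook cid c).getD 0)).foldl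
        (fun e v => PySem.List.pySetD e v 1) (List.replicate cid.length 0) := by
  unfold pvRowA
  generalize List.replicate cid.length (0:Int) = e
  induction cats generalizing e with
  | nil => rfl
  | cons c cs ih =>
    have hc := h c (by simp)
    obtain ⟨v, hv⟩ := Option.isSome_iff_exists.mp hc
    simp only [List.map_cons, List.foldl_cons, hv, Option.getD_some]
    exact ih (fun c' hc' => h c' (by simp [hc'])) _

theorem pvRowA_foldLength (cid : List (String × Int)) :
    ∀ (cs : List String) (e : List Int),
      (cs.foldl (fun encode category =>
        match pvLook cid category with
        | some v => PySem.List.pySetD encode v 1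
        | none => encode) e).length = e.length := by
  intro cs
  induction cs with
  | nil => intro e; rfl
  | cons c cs ih =>
    intro e
    simp only [List.foldl_cons]
    rw [ih]
    cases pvLook cid c <;> simp [PySem.List.length_pySetD]

theorem pvRowA_length (cid : List (String × Int)) (cats : List String) :
    (pvRowA cid cats).length = cid.length := by
  unfold pvRowA
  rw [pvRowA_foldLength]
  simp

theorem pvRowB_length (cid : List (String × Int)) (cats : List String) :
    (pvRowB cid cats).length = cid.length := by
  unfold pvRowB
  simp [PySem.List.length_pyRange_one]

theorem pvRowA_getD (cid : List (String × Int)) (cats : List String) (j : Nat) (hj : j < cid.length)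
    (h : ∀ c ∈ cats, ∃ v, pvLook cid c = some v ∧ -(cid.length : Int) ≤ v ∧ v < (cid.length : Int)) :
    (pvRowA cid cats).getD j 0 =
      if ∃ c ∈ cats, pvNorm cid.length ((pvLook cid c).getD 0) = j then 1 else 0 := by
  rw [pvRowA_eq_valsFold cid cats (fun c hc => by obtain ⟨v, hv, _⟩ := h c hc; simp [hv])]
  rw [getD_setFold _ _ j (by simp [hj])
    (by intro v hv; simp only [List.mem_map] at hv
        obtain ⟨c, hc, hfc⟩ := hv
        obtain ⟨w, hw, hb1, hb2⟩ := h c hc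
        simp only [List.length_replicate]
        rw [← hfc, hw]; exact ⟨hb1, hb2⟩)]
  simp only [List.length_replicate, List.any_map, Function.comp_def]
  by_cases hex : ∃ c ∈ cats, pvNorm cid.length ((pvLook cid c).getD 0) = j
  · have hb : (cats.any fun c => pvNorm cid.length ((pvLook cid c).getD 0) == j) = true := by
      rw [List.any_eq_true]
      obtain ⟨c, hc, hn⟩ := hex
      exact ⟨c, hc, by simp [hn]⟩
    simp [hb, hex]
  · have hb : (cats.any fun c => pvNorm cid.length ((pvLook cid c).getD 0) == j) = false := by
      rw [List.any_eq_false]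
      intro c hc
      simp only [beq_iff_eq]
      exact fun hcontra => hex ⟨c, hc, hcontra⟩
    simp [hb, hex, hj]

theorem pvRowB_getD (cid : List (String × Int)) (cats : List String) (j : Nat) (hj : j < cid.length) :
    (pvRowB cid cats).getD j 0 =
      if (j : Int) ∈ cats.map (fun c => (pvLook cid c).getD 0) then 1 else 0 := by
  unfold pvRowB
  rw [List.getD_eq_getElem _ _ (by simp [PySem.List.length_pyRange_one]; omega)]
  rw [List.getElem_map]
  rw [PySem.List.getElem_pyRange_one]
  by_cases hm : (j : Int) ∈ cats.map (fun c => (pvLook cid c).getD 0)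
  · simp only [zero_add, if_pos hm]
    have : PySem.Set.contains (PySem.Set.ofList (cats.map (fun c => (pvLook cid c).getD 0))) (j : Int) = true := by
      rw [PySem.Set.contains_iff, PySem.Set.mem_ofList]; exact hm
    rw [this]; simp
  · simp only [zero_add, if_neg hm]
    have : PySem.Set.contains (PySem.Set.ofList (cats.map (fun c => (pvLook cid c).getD 0))) (j : Int) = false := by
      rw [Bool.eq_false_iff, ne_eq, PySem.Set.contains_iff, PySem.Set.mem_ofList]; exact hm
    rw [this]; simp

theorem pvRow_eq (cid : List (String × Int)) (cats : List String)
    (h : ∀ c ∈ cats, ∃ v, pvLook cid c = some v ∧ -(cid.length : Int) ≤ v ∧ v < (cid.length : Int))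
    (hnd : ∀ c ∈ cats, ∀ v, pvLook cid c = some v → v < 0 →
      ∃ c' ∈ cats, pvLook cid c' = some (v + (cid.length : Int))) :
    pvRowA cid cats = pvRowB cid cats := by
  apply List.ext_getElem (by rw [pvRowA_length, pvRowB_length])
  intro j hja hjb
  have hj : j < cid.length := by rw [pvRowA_length] at hja; exact hja
  rw [← List.getD_eq_getElem _ 0 hja, ← List.getD_eq_getElem _ 0 hjb]
  rw [pvRowA_getD cid cats j hj h, pvRowB_getD cid cats j hj]
  have hiff : (∃ c ∈ cats, pvNorm cid.length ((pvLook cid c).getD 0) = j) ↔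
      ((j : Int) ∈ cats.map (fun c => (pvLook cid c).getD 0)) := by
    constructor
    · rintro ⟨c, hc, hn⟩
      obtain ⟨v, hv, hb1, hb2⟩ := h c hc
      rw [hv, Option.getD_some] at hn
      by_cases hneg : v < 0
      · obtain ⟨c', hc', hl'⟩ := hnd c hc v hv hneg
        refine List.mem_map.mpr ⟨c', hc', ?_⟩
        rw [hl', Option.getD_some]
        simp only [pvNorm, if_pos hneg] at hn
        omega
      · refine List.mem_map.mpr ⟨c, hc, ?_⟩
        rw [hv, Option.getD_some]
        simp only [pvNorm, if_neg hneg] at hn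
        omega
    · intro hm
      obtain ⟨c, hc, hfc⟩ := List.mem_map.mp hm
      obtain ⟨v, hv, hb1, hb2⟩ := h c hc
      refine ⟨c, hc, ?_⟩
      rw [hv, Option.getD_some] at hfc ⊢
      simp only [pvNorm]
      split_ifs <;> omega
  rw [if_congr hiff rfl rfl]

-- row-level forms of Pre_ and ¬ D_
theorem pre_row (cl : List (List String)) (cid : List (String × Int))
    (hpre : Pre_create_multi_label_categories_vector cl cid)
    (cats : List String) (hcats : cats ∈ cl) :
    ∀ c ∈ cats, ∃ v, pvLook cid c = some v ∧ -(cid.length : Int) ≤ v ∧ v < (cid.length : Int) := by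
  unfold Pre_create_multi_label_categories_vector at hpre
  simp only [List.all_eq_true] at hpre
  intro c hc
  have := hpre cats hcats c hc
  cases hv : pvLook cid c with
  | none => rw [hv] at this; simp at this
  | some v =>
    rw [hv] at this
    simp only [decide_eq_true_eq] at this
    exact ⟨v, rfl, this⟩

theorem notd_row (cl : List (List String)) (cid : List (String × Int))
    (hnd : ¬ D_create_multi_label_categories_vector cl cid)
    (cats : List String) (hcats : cats ∈ cl) :
    ∀ c ∈ cats, ∀ v, pvLook cid c = some v → v < 0 →
      ∃ c' ∈ cats, pvLook cid c' = some (v + (cid.length : Int)) := by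
  intro c hc v hv hneg
  by_contra hno
  push_neg at hno
  apply hnd
  unfold D_create_multi_label_categories_vector
  rw [List.any_eq_true]
  refine ⟨cats, hcats, ?_⟩
  rw [List.any_eq_true]
  refine ⟨c, hc, ?_⟩
  rw [hv]
  simp only [Bool.and_eq_true, Bool.not_eq_true', List.any_eq_false]
  refine ⟨by simp [hneg], ?_⟩
  intro c' hc'
  simp only [beq_iff_eq]
  exact hno c' hc'

-- ===== VERDICT (by name: the statement is the Claim_ definition above) =====
theorem create_multi_label_categories_vector_spec : Claim_unchanged_create_multi_label_categories_vector := by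
  intro cl cid hdom hpre hnd
  unfold create_multi_label_categories_vector create_multi_label_categories_vector_alt
  rw [PySem.List.foldl_append_singleton_eq_map, List.nil_append]
  apply List.map_congr_left
  intro cats hcats
  exact pvRow_eq cid cats (pre_row cl cid hpre cats hcats) (notd_row cl cid hnd cats hcats)

theorem create_multi_label_categories_vector_changed : Claim_changed_create_multi_label_categories_vector := by
  unfold Claim_changed_create_multi_label_categories_vector; decide

theorem create_multi_label_categories_vector_tight : Claim_exact_create_multi_label_categories_vector := by
  intro cl cid hdom hpre hd heq
  unfold D_create_multi_label_categories_vector at hd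
  rw [List.any_eq_true] at hd
  obtain ⟨cats, hcats, hd1⟩ := hd
  rw [List.any_eq_true] at hd1
  obtain ⟨c, hc, hd2⟩ := hd1
  cases hv : pvLook cid c with
  | none => rw [hv] at hd2; simp at hd2
  | some v =>
  rw [hv] at hd2
  simp only [Bool.and_eq_true, decide_eq_true_eq, Bool.not_eq_true', List.any_eq_false] at hd2
  obtain ⟨hneg, hnocomp⟩ := hd2
  obtain ⟨w, hw, hb1, hb2⟩ := pre_row cl cid hpre cats hcats c hc
  rw [hv] at hw
  injection hw with hw
  subst hw
  -- from heq, the rows for cats agree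
  have hrow : pvRowA cid cats = pvRowB cid cats := by
    unfold create_multi_label_categories_vector create_multi_label_categories_vector_alt at heq
    rw [PySem.List.foldl_append_singleton_eq_map, List.nil_append] at heq
    obtain ⟨i, hi, hget⟩ := List.mem_iff_getElem.mp hcats
    have := congrArg (fun l => l[i]?) heq
    simp only [List.getElem?_map] at this
    rw [List.getElem?_eq_getElem hi, hget] at this
    simpa using this
  -- evaluate both rows at the wrapped column
  obtain ⟨j, hjdef⟩ : ∃ j : Nat, (j : Int) = v + (cid.length : Int) :=
    ⟨(v + (cid.length : Int)).toNat, by omega⟩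
  have hj : j < cid.length := by omega
  have hja : (pvRowA cid cats).getD j 0 = 1 := by
    rw [pvRowA_getD cid cats j hj (pre_row cl cid hpre cats hcats)]
    rw [if_pos ⟨c, hc, by rw [hv, Option.getD_some]; simp only [pvNorm, if_pos hneg]; omega⟩]
  have hjb : (pvRowB cid cats).getD j 0 = 0 := by
    rw [pvRowB_getD cid cats j hj]
    rw [if_neg ?_]
    intro hm
    obtain ⟨c', hc', hfc'⟩ := List.mem_map.mp hm
    obtain ⟨v', hv', _, _⟩ := pre_row cl cid hpre cats hcats c' hc'
    have hx := hnocomp c' hc'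
    rw [hv'] at hfc' hx
    rw [Option.getD_some] at hfc'
    simp only [beq_iff_eq, Option.some_inj] at hx
    apply hx
    omega
  rw [hrow] at hja
  rw [hja] at hjb
  exact absurd hjb (by norm_num)
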